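-- pv_equiv track=rewrite | github.com/elsonrodriguez/madhatter | cobbler/action_report.py | reporting_trac
-- ===== SOURCE A (Python) =====
-- def reporting_trac(info, order, noheaders):
--     """
--     Formats data on 'info' for trac wiki table output
--     """
--     outputheaders = ''
--     outputbody = ''
--     sep = '||'
--
--     info_count = 0
--     for item in info:
--
--         item_count = 0
--         for key in order:
--
--
--             if info_count == 0:
--                 outputheaders += sep + str(key)
--
--             if key in item.keys():
--                 outputbody += sep + str(item[key])
--             else:
--                 outputbody += sep + '-'
--
--             item_count = item_count + 1
--
--         info_count = info_count + 1
--         outputbody += '||\n'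
--
--     outputheaders += '||\n'
--
--     if noheaders:
--         outputheaders = '';
--
--     return outputheaders + outputbody
-- ===== SOURCE B (Python) =====
-- def reporting_trac(info, order, noheaders):
--     """
--     Formats data on 'info' for trac wiki table output
--     """
--     header = ['']
--     rows = [[''] for _ in info]
--     for key in order:
--         header.append(str(key))
--         for row, item in zip(rows, info):
--             row.append(str(item[key]) if key in item else '-')
--     lines = rows if noheaders else [header] + rows
--     return ''.join('||'.join(line) + '||\n' for line in lines)
-- ===== Notes on version B (the rewrite author's own statement) =====
-- stated objective: alternative
-- what changed: Builds the table column-major: one loop over the keys appends each column's cell to the header list and to every row's cell list (via zip), then each line is joined with '||' and the lines concatenated once, instead of A's row-major nested loops accumulating strings with an info_count flag.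
-- intended difference: When info is empty, noheaders is false and order is non-empty, A returns the bare header '||\n' (its header is only built inside the first row's loop) while B returns the full header listing the keys of order, which is the intended header of an empty table. — e.g. on reporting_trac([], ["a"], false): A returns "||\n", B returns "||a||\n"
import Mathlib
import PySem

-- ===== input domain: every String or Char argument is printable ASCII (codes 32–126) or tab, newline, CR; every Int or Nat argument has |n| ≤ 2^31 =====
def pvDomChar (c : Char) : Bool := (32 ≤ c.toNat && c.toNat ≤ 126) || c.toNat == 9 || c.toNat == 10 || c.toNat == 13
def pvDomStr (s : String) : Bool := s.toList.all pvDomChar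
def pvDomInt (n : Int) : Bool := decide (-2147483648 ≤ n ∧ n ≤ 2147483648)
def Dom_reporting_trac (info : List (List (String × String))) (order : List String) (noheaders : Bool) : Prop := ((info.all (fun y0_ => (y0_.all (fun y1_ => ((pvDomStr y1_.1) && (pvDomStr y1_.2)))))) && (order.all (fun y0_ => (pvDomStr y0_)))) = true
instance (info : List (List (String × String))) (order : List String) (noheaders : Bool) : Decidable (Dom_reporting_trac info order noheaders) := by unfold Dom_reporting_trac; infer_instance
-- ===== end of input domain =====

-- B builds the table column-major (one loop over keys extending the header and every
-- row buffer) and joins the line list once; same cost as A, different traversal.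

-- ===== PORT A =====
-- literal transliteration of A: one fold over info, inner fold over order,
-- state (outputheaders, outputbody, info_count); inner state carries item_count.
-- 'key in item.keys() / item[key]' is the first-match lookup (PySem.Dict.get?).
def reporting_trac (info : List (List (String × String))) (order : List String) (noheaders : Bool) : String :=
  let sep := "||"
  let st := info.foldl
    (fun (st : String × String × Int) item =>
      let inner := order.foldl
        (fun (p : String × String × Int) key =>
          let oh := if st.2.2 = 0 then p.1 ++ (sep ++ key) else p.1
          let ob := match (PySem.Dict.mk item).get? key with
                    | some v => p.2.1 ++ (sep ++ v)
                    | none   => p.2.1 ++ (sep ++ "-")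
          (oh, ob, p.2.2 + 1))
        (st.1, st.2.1, (0 : Int))
      (inner.1, inner.2.1 ++ "||\n", st.2.2 + 1))
    (("", "", (0 : Int)) : String × String × Int)
  let oh := st.1 ++ "||\n"
  let oh := if noheaders then "" else oh
  oh ++ st.2.1

-- ===== PORT B =====
-- str(item[key]) if key in item else '-'  (values are strings, str() is identity)
def cellB (item : List (String × String)) (key : String) : String :=
  match (PySem.Dict.mk item).get? key with
  | some v => v
  | none   => "-"

-- column-major: fold over order with state (header cells, per-row cell lists)
def reporting_trac_alt (info : List (List (String × String))) (order : List String) (noheaders : Bool) : String :=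
  let st := order.foldl
    (fun (st : List String × List (List String)) key =>
      (st.1 ++ [key],
       (st.2.zip info).map (fun p => p.1 ++ [cellB p.2 key])))
    (([""], info.map (fun _ => [""])) : List String × List (List String))
  let lines := if noheaders then st.2 else st.1 :: st.2
  PySem.Str.join "" (lines.map (fun line => PySem.Str.join "||" line ++ "||\n"))

-- ===== PRECONDITION & SPEC =====
-- When info is empty, noheaders is false and order is non-empty, A returns the bare
-- header "||\n" (its header is only built inside the first row's loop) while B returns
-- the full header listing the keys of order — the intended header of an empty table.
def D_reporting_trac (info : List (List (String × String))) (order : List String) (noheaders : Bool) : Prop :=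
  info = [] ∧ noheaders = false ∧ order ≠ []
instance (info : List (List (String × String))) (order : List String) (noheaders : Bool) : Decidable (D_reporting_trac info order noheaders) := by unfold D_reporting_trac; infer_instance

def Spec_reporting_trac (info : List (List (String × String))) (order : List String) (noheaders : Bool) (out : String) : Prop := ¬ D_reporting_trac info order noheaders → out = reporting_trac_alt info order noheaders
instance (info : List (List (String × String))) (order : List String) (noheaders : Bool) (out : String) : Decidable (Spec_reporting_trac info order noheaders out) := by unfold Spec_reporting_trac; infer_instance

def pvDiffWitness_reporting_trac : (List (List (String × String))) × List String × Bool := ([], ["a"], false)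
def pvDiffWitnessOut_reporting_trac : String × String := ("||\n", "||a||\n")

-- ===== CLAIM (what is proved, stated in full; the proofs are below) =====
def Claim_unchanged_reporting_trac : Prop := ∀ (info : List (List (String × String))) (order : List String) (noheaders : Bool), Dom_reporting_trac info order noheaders → Spec_reporting_trac info order noheaders (reporting_trac info order noheaders)
def Claim_changed_reporting_trac : Prop := Dom_reporting_trac (pvDiffWitness_reporting_trac.1) (pvDiffWitness_reporting_trac.2.1) (pvDiffWitness_reporting_trac.2.2) ∧ D_reporting_trac (pvDiffWitness_reporting_trac.1) (pvDiffWitness_reporting_trac.2.1) (pvDiffWitness_reporting_trac.2.2) ∧ reporting_trac (pvDiffWitness_reporting_trac.1) (pvDiffWitness_reporting_trac.2.1) (pvDiffWitness_reporting_trac.2.2) = pvDiffWitnessOut_reporting_trac.1 ∧ reporting_trac_alt (pvDiffWitness_reporting_trac.1) (pvDiffWitness_reporting_trac.2.1) (pvDiffWitness_reporting_trac.2.2) = pvDiffWitnessOut_reporting_trac.2 ∧ pvDiffWitnessOut_reporting_trac.1 ≠ pvDiffWitnessOut_reporting_trac.2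
def Claim_exact_reporting_trac : Prop := ∀ (info : List (List (String × String))) (order : List String) (noheaders : Bool), Dom_reporting_trac info order noheaders → D_reporting_trac info order noheaders → reporting_trac info order noheaders ≠ reporting_trac_alt info order noheaders

-- ===== LEMMAS AND PROOFS =====

-- '||'-prefixed cells, concatenated (the shape both programs produce per line)
def cellCat (cells : List String) : String :=
  cells.foldr (fun c acc => "||" ++ (c ++ acc)) ""

def bodyCat (order : List String) (info : List (List (String × String))) : String :=
  info.foldr (fun item acc => cellCat (order.map (cellB item)) ++ ("||\n" ++ acc)) ""

theorem toList_cellCat (cells : List String) :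
    (cellCat cells).toList = cells.foldr (fun c acc => ['|','|'] ++ c.toList ++ acc) [] := by
  induction cells with
  | nil => rfl
  | cons c cs ih => simp [cellCat, String.toList_append] at ih ⊢; simp [ih]

theorem strjoin_empty (rows : List String) :
    PySem.Str.join "" rows = rows.foldr (fun r acc => r ++ acc) "" := by
  apply String.toList_inj.mp
  induction rows with
  | nil => rfl
  | cons r rs ih =>
    cases rs with
    | nil => simp [PySem.Str.join, PySem.Chars.join_singleton]
    | cons r' rs' =>
      simp [PySem.Str.join, PySem.Chars.join_cons_cons, String.toList_append] at ih ⊢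
      simp [ih]

theorem zip_map_self {α β : Type} (g : α → β) (l : List α) :
    (l.map g).zip l = l.map (fun x => (g x, x)) := by
  induction l with
  | nil => rfl
  | cons x xs ih => simp [ih]

-- the B fold, generalized: header cells h, body rows = info.map g
theorem fold_B (order : List String) (info : List (List (String × String)))
    (h : List String) (g : List (String × String) → List String) :
    order.foldl
      (fun (st : List String × List (List String)) key =>
        (st.1 ++ [key],
         (st.2.zip info).map (fun p => p.1 ++ [cellB p.2 key])))
      (h, info.map g)
    = (h ++ order, info.map (fun it => g it ++ order.map (cellB it))) := by
  induction order generalizing h g with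
  | nil => simp
  | cons k ks ih =>
    simp only [List.foldl_cons, zip_map_self, List.map_map]
    rw [show ((fun p : List String × List (String × String) => p.1 ++ [cellB p.2 k]) ∘
          fun x => (g x, x)) = (fun it => g it ++ [cellB it k]) from rfl]
    rw [ih (h ++ [k]) (fun it => g it ++ [cellB it k])]
    simp

theorem chars_join_head (c : List Char) (cs : List (List Char)) :
    PySem.Chars.join ['|','|'] (c :: cs)
      = c ++ cs.foldr (fun x acc => ['|','|'] ++ x ++ acc) [] := by
  induction cs generalizing c with
  | nil => rw [PySem.Chars.join_singleton]; simp
  | cons c' cs' ih =>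
    rw [PySem.Chars.join_cons_cons, ih c']
    simp

-- '||'.join on a line beginning with the empty cell
theorem strjoin_line (cells : List String) :
    PySem.Str.join "||" ("" :: cells) = cellCat cells := by
  apply String.toList_inj.mp
  have hbar : ("||" : String).toList = ['|','|'] := by decide
  simp only [PySem.Str.join, List.map_cons, String.toList_ofList, toList_cellCat, hbar]
  have : (("" : String).toList) = [] := by decide
  rw [this, chars_join_head]
  simp [List.foldr_map]

theorem joined_body (order : List String) (info : List (List (String × String))) :
    ((info.map (fun it => ("" :: order.map (cellB it) : List String))).map
        (fun line => PySem.Str.join "||" line ++ "||\n")).foldr (fun r acc => r ++ acc) ""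
    = bodyCat order info := by
  induction info with
  | nil => rfl
  | cons it rest ih =>
    simp only [List.map_cons, List.foldr_cons]
    rw [ih, strjoin_line]
    apply String.toList_inj.mp
    simp [bodyCat, String.toList_append]

-- B simplified on the whole domain
theorem alt_eq (info : List (List (String × String))) (order : List String) (noheaders : Bool) :
    reporting_trac_alt info order noheaders
    = (if noheaders then "" else cellCat order ++ "||\n") ++ bodyCat order info := by
  unfold reporting_trac_alt
  rw [fold_B order info [""] (fun _ => ([""] : List String))]
  simp only [List.singleton_append]
  cases noheaders with
  | true =>
    simp only [reduceIte]
    rw [strjoin_empty, joined_body]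
    apply String.toList_inj.mp
    simp
  | false =>
    simp only [Bool.false_eq_true, if_false]
    rw [strjoin_empty]
    simp only [List.map_cons, List.foldr_cons, strjoin_line]
    rw [joined_body]

theorem inner_A (order : List String) (item : List (String × String))
    (flag : Int) (oh ob : String) (itc : Int) :
    order.foldl
      (fun (p : String × String × Int) key =>
        let oh := if flag = 0 then p.1 ++ ("||" ++ key) else p.1
        let ob := match (PySem.Dict.mk item).get? key with
                  | some v => p.2.1 ++ ("||" ++ v)
                  | none   => p.2.1 ++ ("||" ++ "-")
        (oh, ob, p.2.2 + 1))
      (oh, ob, itc)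
    = ((if flag = 0 then oh ++ cellCat order else oh),
       ob ++ cellCat (order.map (cellB item)), itc + order.length) := by
  induction order generalizing oh ob itc with
  | nil => simp [cellCat]
  | cons k ks ih =>
    have hcell : (match (PySem.Dict.mk item).get? k with
        | some v => ob ++ ("||" ++ v)
        | none   => ob ++ ("||" ++ "-")) = ob ++ ("||" ++ cellB item k) := by
      cases h : (PySem.Dict.mk item).get? k <;> simp [cellB, h]
    simp only [List.foldl_cons, hcell, ih]
    refine Prod.ext ?_ (Prod.ext ?_ ?_)
    · by_cases hf : flag = 0 <;>
        simp [hf, cellCat, String.append_assoc]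
    · apply String.toList_inj.mp
      simp [toList_cellCat, String.toList_append]
    · simp; omega

theorem outer_A (order : List String) (info : List (List (String × String)))
    (oh ob : String) (ic : Int) (hic : 1 ≤ ic) :
    info.foldl
      (fun (st : String × String × Int) item =>
        ((if st.2.2 = 0 then st.1 ++ cellCat order else st.1),
         st.2.1 ++ cellCat (List.map (cellB item) order) ++ "||\n",
         st.2.2 + 1))
      (oh, ob, ic)
    = (oh, ob ++ bodyCat order info, ic + info.length) := by
  induction info generalizing ob ic with
  | nil => simp [bodyCat]
  | cons it rest ih =>
    simp only [List.foldl_cons]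
    have hne : ¬ (ic = 0) := by omega
    simp only [hne, if_false]
    rw [ih _ _ (by omega)]
    refine Prod.ext rfl (Prod.ext ?_ ?_)
    · apply String.toList_inj.mp
      simp [bodyCat, String.toList_append]
    · simp; omega

-- A simplified, for nonempty info
theorem a_eq_cons (it : List (String × String)) (rest : List (List (String × String)))
    (order : List String) (noheaders : Bool) :
    reporting_trac (it :: rest) order noheaders
    = (if noheaders then "" else cellCat order ++ "||\n") ++ bodyCat order (it :: rest) := by
  unfold reporting_trac
  simp only [List.foldl_cons, inner_A]
  rw [outer_A order rest _ _ (0+1) (by omega)]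
  cases noheaders with
  | true =>
    apply String.toList_inj.mp
    simp [String.toList_append, bodyCat]
  | false =>
    apply String.toList_inj.mp
    simp [String.toList_append, bodyCat, toList_cellCat]

-- ===== VERDICT (by name: the statement is the Claim_ definition above) =====
theorem reporting_trac_spec : Claim_unchanged_reporting_trac := by
  unfold Claim_unchanged_reporting_trac
  intro info order noheaders _
  unfold Spec_reporting_trac
  intro hnd
  rw [alt_eq]
  cases info with
  | nil =>
    unfold D_reporting_trac at hnd
    push_neg at hnd
    unfold reporting_trac
    simp only [List.foldl_nil]
    cases noheaders with
    | true =>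
      apply String.toList_inj.mp
      simp [bodyCat, String.toList_append]
    | false =>
      have horder : order = [] := by
        rcases Bool.eq_false_or_eq_true false with h | h
        · by_contra hne
          exact hne (hnd rfl rfl)
        · by_contra hne
          exact hne (hnd rfl rfl)
      subst horder
      apply String.toList_inj.mp
      simp [bodyCat, cellCat, String.toList_append]
  | cons it rest =>
    exact (a_eq_cons it rest order noheaders).symm ▸ rfl

theorem reporting_trac_changed : Claim_changed_reporting_trac := by
  unfold Claim_changed_reporting_trac; decide

theorem reporting_trac_tight : Claim_exact_reporting_trac := by
  unfold Claim_exact_reporting_trac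
  intro info order noheaders _ hd
  obtain ⟨hinfo, hnh, hord⟩ := hd
  subst hinfo; subst hnh
  cases order with
  | nil => exact absurd rfl hord
  | cons k ks =>
    rw [alt_eq]
    unfold reporting_trac
    simp only [List.foldl_nil]
    intro heq
    have hl := congrArg (fun t : String => t.toList.length) heq
    simp [String.toList_append, bodyCat, toList_cellCat] at hl
    omega
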